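-- pv_equiv track=rewrite | github.com/oorellana95/hackerrank-python | preparation_kits/_1_week/_5_day/balanced_brackets.py | isBalancedWeak
-- ===== SOURCE A (Python) =====
-- def isBalancedWeak(s):
--     s_len = len(s)
--     if s_len % 2 != 0:
--         "NO"
--
--     my_bracket_dict = {"[": "]", "(": ")", "{": "}"}
--
--     for i in range(s_len // 2):
--         if my_bracket_dict.get(s[i]) == s[s_len - (i+1)]:
--             pass
--         else:
--             return "NO"
--     return "YES"
-- ===== SOURCE B (Python) =====
-- def isBalancedWeak(s):
--     d = {"[": "]", "(": ")", "{": "}"}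
--     # two stacks: popping `front` yields chars from the start, `back` from the end
--     front = list(reversed(s))
--     back = list(s)
--     remaining = len(s)
--     while remaining >= 2:
--         a = front.pop()
--         b = back.pop()
--         if d.get(a) != b:
--             return "NO"
--         remaining -= 2
--     return "YES"
-- ===== Notes on version B (the rewrite author's own statement) =====
-- stated objective: alternative
-- what changed: A's indexed for-loop over range(n//2) is replaced by a destructive two-stack peel: the string is loaded into two stacks (one reversed), and matching ends are popped off until fewer than two characters remain; no index arithmetic into the original string.
import Mathlib
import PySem

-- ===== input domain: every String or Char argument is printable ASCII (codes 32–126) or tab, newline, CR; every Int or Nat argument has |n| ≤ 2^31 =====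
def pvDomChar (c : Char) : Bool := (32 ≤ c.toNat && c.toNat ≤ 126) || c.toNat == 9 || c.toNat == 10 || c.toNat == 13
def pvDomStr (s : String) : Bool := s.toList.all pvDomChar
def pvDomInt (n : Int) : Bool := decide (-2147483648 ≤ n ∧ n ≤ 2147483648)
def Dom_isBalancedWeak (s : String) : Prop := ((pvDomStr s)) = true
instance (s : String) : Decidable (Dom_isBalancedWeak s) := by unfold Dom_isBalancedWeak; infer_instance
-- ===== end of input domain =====

-- B replaces A's indexed pairwise loop by a destructive two-stack peel (pop matching ends until
-- fewer than two chars remain); objective: alternative, same O(n) cost.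


-- my_bracket_dict.get(c) / d.get(c): None for non-opening-bracket characters
def pvBracketGet (c : Char) : Option Char :=
  if c = '[' then some ']' else if c = '(' then some ')' else if c = '{' then some '}' else none

-- ===== PORT A =====
-- the loop over range(s_len // 2); indices i and s_len-(i+1) are always in range
-- (0 ≤ i < n/2 ≤ n), so getD with a dummy default is exact for Python's s[i]
def pvAGo (cs : List Char) (n : Nat) : List Nat → String
  | [] => "YES"
  | i :: rest =>
    if pvBracketGet (cs.getD i ' ') = some (cs.getD (n - (i + 1)) ' ') then
      pvAGo cs n rest
    else "NO"

def isBalancedWeak (s : String) : String :=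
  pvAGo s.toList s.toList.length (List.range (s.toList.length / 2))

-- ===== PORT B =====
-- the while loop: `front`/`back` are the two stacks, pop = (getLast?, dropLast);
-- the stacks are nonempty whenever popped (remaining ≥ 2), so getD ' ' is exact for list.pop()
def pvPeel (front back : List Char) (remaining : Nat) : String :=
  if remaining < 2 then "YES"
  else
    let a := front.getLast?.getD ' '
    let b := back.getLast?.getD ' '
    if pvBracketGet a ≠ some b then "NO"
    else pvPeel front.dropLast back.dropLast (remaining - 2)
termination_by remaining

def isBalancedWeak_alt (s : String) : String :=
  pvPeel s.toList.reverse s.toList s.toList.length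

-- ===== PRECONDITION & SPEC =====
def Spec_isBalancedWeak (s : String) (out : String) : Prop := out = isBalancedWeak_alt s
instance (s : String) (out : String) : Decidable (Spec_isBalancedWeak s out) := by unfold Spec_isBalancedWeak; infer_instance

-- ===== CLAIM (what is proved, stated in full; the proofs are below) =====
def Claim_equal_isBalancedWeak : Prop := ∀ (s : String), Dom_isBalancedWeak s → Spec_isBalancedWeak s (isBalancedWeak s)

-- ===== LEMMAS AND PROOFS =====

-- the pairwise condition at index j
abbrev pvCond (cs : List Char) (j : Nat) : Prop :=
  pvBracketGet (cs.getD j ' ') = some (cs.getD (cs.length - (j + 1)) ' ')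

theorem pvAGo_eq_all (cs : List Char) (n : Nat) (l : List Nat) :
    pvAGo cs n l =
      if l.all (fun i => decide (pvBracketGet (cs.getD i ' ') = some (cs.getD (n - (i + 1)) ' '))) then "YES" else "NO" := by
  induction l with
  | nil => simp [pvAGo]
  | cons i rest ih =>
    simp only [pvAGo, ih, List.all_cons, Bool.and_eq_true, decide_eq_true_eq]
    split_ifs <;> tauto

theorem pvA_canon (cs : List Char) :
    pvAGo cs cs.length (List.range (cs.length / 2)) =
      if (∀ j < cs.length / 2, pvCond cs j) then "YES" else "NO" := by
  rw [pvAGo_eq_all]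
  congr 1
  rw [List.all_eq_true]
  simp [pvCond]

-- one peel step: front/back invariant shapes after i iterations
theorem pvPeel_step (cs : List Char) (i : Nat) (hi : i < cs.length / 2) :
    pvPeel ((cs.drop i).reverse) (cs.take (cs.length - i)) (cs.length - 2 * i) =
      if pvBracketGet (cs.getD i ' ') = some (cs.getD (cs.length - (i + 1)) ' ') then
        pvPeel ((cs.drop (i + 1)).reverse) (cs.take (cs.length - (i + 1))) (cs.length - 2 * (i + 1))
      else "NO" := by
  have hn : 2 * (cs.length / 2) ≤ cs.length := by omega
  have h2 : ¬ (cs.length - 2 * i < 2) := by omega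
  have hiL : i < cs.length := by omega
  rw [pvPeel, if_neg h2]
  have ha : ((cs.drop i).reverse).getLast?.getD ' ' = cs.getD i ' ' := by
    rw [List.getLast?_reverse]
    simp [List.head?_drop, List.getD_eq_getElem?_getD]
  have hb : (cs.take (cs.length - i)).getLast?.getD ' ' = cs.getD (cs.length - (i + 1)) ' ' := by
    rw [List.getLast?_eq_getElem?, List.getElem?_take, List.getD_eq_getElem?_getD]
    simp only [List.length_take]
    rw [show min (cs.length - i) cs.length - 1 = cs.length - (i + 1) by omega,
      if_pos (by omega : cs.length - (i + 1) < cs.length - i)]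
  have hfront : ((cs.drop i).reverse).dropLast = (cs.drop (i + 1)).reverse := by
    rw [List.dropLast_reverse]
    congr 1
    rw [List.tail_drop]
  have hback : (cs.take (cs.length - i)).dropLast = cs.take (cs.length - (i + 1)) := by
    rw [List.dropLast_eq_take, List.take_take]
    congr 1
    simp
    omega
  rw [ha, hb, hfront, hback]
  have hrem : cs.length - 2 * i - 2 = cs.length - 2 * (i + 1) := by omega
  rw [hrem]
  by_cases h : pvBracketGet (cs.getD i ' ') = some (cs.getD (cs.length - (i + 1)) ' ')
  · rw [if_neg (by simpa using h), if_pos h]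
  · rw [if_pos (by simpa using h), if_neg h]

theorem pvPeel_canon (cs : List Char) (i : Nat) (hi : i ≤ cs.length / 2) :
    pvPeel ((cs.drop i).reverse) (cs.take (cs.length - i)) (cs.length - 2 * i) =
      if (∀ j, j < cs.length / 2 → i ≤ j → pvCond cs j) then "YES" else "NO" := by
  have hm : cs.length / 2 - i + i = cs.length / 2 := by omega
  generalize hk : cs.length / 2 - i = k at *
  induction k generalizing i with
  | zero =>
    have hie : i = cs.length / 2 := by omega
    have hlt : cs.length - 2 * i < 2 := by
      subst hie
      omega
    rw [pvPeel, if_pos hlt, if_pos]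
    intro j hj hij
    omega
  | succ k ih =>
    have hi2 : i < cs.length / 2 := by omega
    rw [pvPeel_step cs i hi2]
    rw [ih (i + 1) (by omega) (by omega) (by omega)]
    simp only [show (pvBracketGet (cs.getD i ' ') = some (cs.getD (cs.length - (i + 1)) ' ')) = pvCond cs i from rfl]
    by_cases hc : pvCond cs i
    · rw [if_pos hc]
      congr 1
      · apply propext
        constructor
        · intro h j hj hij
          rcases Nat.eq_or_lt_of_le hij with rfl | hlt
          · exact hc
          · exact h j hj (by omega)
        · intro h j hj hij
          exact h j hj (by omega)
    · rw [if_neg hc, if_neg]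
      intro h
      exact hc (h i hi2 le_rfl)

theorem pvB_canon (cs : List Char) :
    pvPeel cs.reverse cs cs.length =
      if (∀ j < cs.length / 2, pvCond cs j) then "YES" else "NO" := by
  have h := pvPeel_canon cs 0 (Nat.zero_le _)
  simpa using h

-- ===== VERDICT (by name: the statement is the Claim_ definition above) =====
theorem isBalancedWeak_spec : Claim_equal_isBalancedWeak := by
  intro s _
  unfold Spec_isBalancedWeak isBalancedWeak isBalancedWeak_alt
  rw [pvA_canon, pvB_canon]
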